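-- pv_equiv track=rewrite | github.com/gmacgre/advent_of_code_2024 | 22/22-2.py | getPriceMap
-- ===== SOURCE A (Python) =====
-- def mix(input: int, specialNum: int) -> int:
--     return specialNum ^ input
--
-- def prune(specialNum: int) -> int:
--     return specialNum % 16777216
--
-- def getNextNumber(currPrice: int) -> int:
--     newPrice = currPrice * 64
--     newPrice = mix(newPrice, currPrice)
--     newPrice = prune(newPrice)
--     other = newPrice // 32
--     newPrice = mix(other, newPrice)
--     newPrice = prune(newPrice)
--     other = newPrice * 2048
--     newPrice = mix(other, newPrice)
--     newPrice = prune(newPrice)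
--     return newPrice
--
-- def getChange(start: int, end: int) -> int:
--     return end - start
--
-- def getPriceMap(currPrice: int, iterations=2000) -> int:
--     prices = []
--     changes = []
--     changeMap = {}
--     prices.append(currPrice % 10)
--     for i in range(iterations):
--         currPrice = getNextNumber(currPrice)
--         price = currPrice % 10
--         changes.append(getChange(prices[-1], price))
--         prices.append(price)
--         if i > 2:
--             toTuple = changes[-4:]
--             toTuple = tuple(toTuple)
--             if toTuple not in changeMap:
--                 changeMap[toTuple] = price
--     return changeMap
-- ===== SOURCE B (Python) =====
-- def mix(input: int, specialNum: int) -> int: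
--     return specialNum ^ input
--
-- def prune(specialNum: int) -> int:
--     return specialNum % 16777216
--
-- def getNextNumber(currPrice: int) -> int:
--     newPrice = currPrice * 64
--     newPrice = mix(newPrice, currPrice)
--     newPrice = prune(newPrice)
--     other = newPrice // 32
--     newPrice = mix(other, newPrice)
--     newPrice = prune(newPrice)
--     other = newPrice * 2048
--     newPrice = mix(other, newPrice)
--     newPrice = prune(newPrice)
--     return newPrice
--
-- def getPriceMap(currPrice: int, iterations=2000):
--     # secret-number sequence, then its price digits and consecutive changes
--     secrets = [currPrice]
--     for _ in range(iterations):
--         secrets.append(getNextNumber(secrets[-1]))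
--     prices = [s % 10 for s in secrets]
--     changes = [prices[k + 1] - prices[k] for k in range(len(prices) - 1)]
--     # reverse pass: overwriting leaves every window key mapped to its FIRST occurrence index
--     first = {}
--     for j in reversed(range(len(changes) - 3)):
--         first[tuple(changes[j:j + 4])] = j
--     # forward pass: keep exactly the windows that are their key's first occurrence
--     return {tuple(changes[j:j + 4]): prices[j + 4]
--             for j in range(len(changes) - 3)
--             if first[tuple(changes[j:j + 4])] == j}
-- ===== Notes on version B (the rewrite author's own statement) =====
-- stated objective: alternative
-- what changed: A does one forward scan that tests each 4-change window for membership in the growing result dict; B never tests membership in the result: it makes a reverse pass over the windows whose last-write-wins overwriting leaves each key mapped to its first occurrence index, then a forward pass keeps exactly the windows whose index equals their key's stored first index.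
import Mathlib
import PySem

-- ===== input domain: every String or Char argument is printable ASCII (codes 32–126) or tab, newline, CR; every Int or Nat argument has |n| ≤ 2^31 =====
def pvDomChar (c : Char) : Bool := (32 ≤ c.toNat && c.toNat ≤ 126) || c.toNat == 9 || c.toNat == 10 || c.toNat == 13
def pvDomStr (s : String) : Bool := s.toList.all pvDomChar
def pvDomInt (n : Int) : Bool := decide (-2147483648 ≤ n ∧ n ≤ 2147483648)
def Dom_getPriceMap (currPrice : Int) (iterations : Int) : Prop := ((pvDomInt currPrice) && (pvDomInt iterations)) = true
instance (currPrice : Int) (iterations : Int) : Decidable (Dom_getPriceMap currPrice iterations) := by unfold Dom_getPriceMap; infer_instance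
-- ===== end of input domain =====

-- B replaces A's forward scan with its first-seen membership test on the growing result by a
-- reverse pass whose dict overwriting leaves each 4-change window key mapped to its first
-- occurrence index, followed by a forward pass keeping exactly the windows that are their key's
-- first occurrence; same values, no speed claim.  The dict keyed by a 4-tuple of changes is
-- rendered as an insertion-ordered list of 5-tuples (the 4 key components then the price).

-- ===== PORT A =====
def mix (input : Int) (specialNum : Int) : Int := PySem.Int.bxor specialNum input

def prune (specialNum : Int) : Int := PySem.Int.mod specialNum 16777216

def getNextNumber (currPrice : Int) : Int :=
  let newPrice := currPrice * 64
  let newPrice := prune (mix newPrice currPrice)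
  let other := PySem.Int.floordiv newPrice 32
  let newPrice := prune (mix other newPrice)
  let other2 := newPrice * 2048
  prune (mix other2 newPrice)

def getChange (start : Int) (end_ : Int) : Int := end_ - start

-- dict membership 'toTuple in changeMap' on the flattened association list
def hasKey (m : List (Int × Int × Int × Int × Int)) (k : Int × Int × Int × Int) : Bool :=
  m.any (fun e => (e.1, e.2.1, e.2.2.1, e.2.2.2.1) == k)

-- the body of A's 'for i in range(iterations)' loop; state = (prices, changes, changeMap, currPrice)
def stepA (st : List Int × List Int × List (Int × Int × Int × Int × Int) × Int) (i : Int) :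
    List Int × List Int × List (Int × Int × Int × Int × Int) × Int :=
  let cp := getNextNumber st.2.2.2
  let price := PySem.Int.mod cp 10
  let changes := st.2.1 ++ [getChange (PySem.List.pyGetD st.1 (-1) 0) price]
  let prices := st.1 ++ [price]
  let changeMap :=
    if i > 2 then
      match PySem.List.slice changes (some (-4)) none with
      | [a, b, c, d] =>
        if hasKey st.2.2.1 (a, b, c, d) then st.2.2.1 else st.2.2.1 ++ [(a, b, c, d, price)]
      | _ => st.2.2.1     -- unreachable: changes[-4:] has exactly 4 elements when i > 2
    else st.2.2.1
  (prices, changes, changeMap, cp)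

def getPriceMap (currPrice : Int) (iterations : Int) : List (Int × Int × Int × Int × Int) :=
  let st := (PySem.List.pyRange 0 iterations 1).foldl stepA
    ([PySem.Int.mod currPrice 10], [], [], currPrice)
  st.2.2.1

-- ===== PORT B =====
-- tuple(changes[j:j+4]) — always a full 4-wide window for the scanned j
def key4 (changes : List Int) (j : Int) : Int × Int × Int × Int :=
  match PySem.List.slice changes (some j) (some (j + 4)) with
  | [a, b, c, d] => (a, b, c, d)
  | _ => (0, 0, 0, 0)     -- unreachable: every scanned j has a full window

-- 'result[key] = price' of the final dict comprehension, on the flattened association list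
def dcInsert (res : List (Int × Int × Int × Int × Int)) (k : Int × Int × Int × Int) (p : Int) :
    List (Int × Int × Int × Int × Int) :=
  if hasKey res k then
    res.map (fun e => if (e.1, e.2.1, e.2.2.1, e.2.2.2.1) == k then (k.1, k.2.1, k.2.2.1, k.2.2.2, p) else e)
  else res ++ [(k.1, k.2.1, k.2.2.1, k.2.2.2, p)]

def getPriceMap_alt (currPrice : Int) (iterations : Int) : List (Int × Int × Int × Int × Int) :=
  -- secrets = [currPrice]; for _ in range(iterations): secrets.append(getNextNumber(secrets[-1]))
  let secrets := (PySem.List.pyRange 0 iterations 1).foldl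
    (fun s _ => s ++ [getNextNumber (PySem.List.pyGetD s (-1) 0)]) [currPrice]
  -- prices = [s % 10 for s in secrets]
  let prices := secrets.map (fun s => PySem.Int.mod s 10)
  -- changes = [prices[k+1] - prices[k] for k in range(len(prices) - 1)]
  let changes := (PySem.List.pyRange 0 ((prices.length : Int) - 1) 1).map
    (fun k => PySem.List.pyGetD prices (k + 1) 0 - PySem.List.pyGetD prices k 0)
  -- first = {}; for j in reversed(range(len(changes) - 3)): first[tuple(changes[j:j+4])] = j
  let first := ((PySem.List.pyRange 0 ((changes.length : Int) - 3) 1).reverse).foldl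
    (fun d j => PySem.Dict.insert d (key4 changes j) j)
    (PySem.Dict.empty : PySem.Dict (Int × Int × Int × Int) Int)
  -- {tuple(changes[j:j+4]): prices[j+4] for j in range(len(changes)-3) if first[tuple(changes[j:j+4])] == j}
  (PySem.List.pyRange 0 ((changes.length : Int) - 3) 1).foldl
    (fun res j =>
      if (PySem.Dict.get? first (key4 changes j)).getD 0 == j then
        dcInsert res (key4 changes j) (PySem.List.pyGetD prices (j + 4) 0)
      else res) []

-- ===== PRECONDITION & SPEC =====
def Spec_getPriceMap (currPrice : Int) (iterations : Int) (out : List (Int × Int × Int × Int × Int)) : Prop := out = getPriceMap_alt currPrice iterations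
instance (currPrice : Int) (iterations : Int) (out : List (Int × Int × Int × Int × Int)) : Decidable (Spec_getPriceMap currPrice iterations out) := by unfold Spec_getPriceMap; infer_instance

-- ===== CLAIM (what is proved, stated in full; the proofs are below) =====
def Claim_equal_getPriceMap : Prop := ∀ (currPrice : Int) (iterations : Int), Dom_getPriceMap currPrice iterations → Spec_getPriceMap currPrice iterations (getPriceMap currPrice iterations)

-- ===== LEMMAS AND PROOFS =====

-- the k-th pseudo-random number, its price digit, and its price change
def iterN (c : Int) : Nat → Int
  | 0 => c
  | n + 1 => getNextNumber (iterN c n)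

def Pf (c : Int) (k : Nat) : Int := PySem.Int.mod (iterN c k) 10

def Cf (c : Int) (k : Nat) : Int := Pf c (k + 1) - Pf c k

-- the 4-change window key starting at j, and the map entry it contributes
def Kf (c : Int) (j : Nat) : Int × Int × Int × Int := (Cf c j, Cf c (j + 1), Cf c (j + 2), Cf c (j + 3))

def entry5 (c : Int) (j : Nat) : Int × Int × Int × Int × Int :=
  (Cf c j, Cf c (j + 1), Cf c (j + 2), Cf c (j + 3), Pf c (j + 4))

-- window j is its key's first occurrence
def freshB (c : Int) (j : Nat) : Bool := !((List.range j).any (fun i => Kf c i == Kf c j))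

-- the first-seen map over the first m windows, in the abstract
def mapAbs (c : Int) (m : Nat) : List (Int × Int × Int × Int × Int) :=
  (List.range m).foldl (fun res k =>
    if hasKey res (Cf c k, Cf c (k + 1), Cf c (k + 2), Cf c (k + 3)) then res
    else res ++ [(Cf c k, Cf c (k + 1), Cf c (k + 2), Cf c (k + 3), Pf c (k + 4))]) []

-- the same map as a filtered map: the fresh windows, in order
def Ff (c : Int) (m : Nat) : List (Int × Int × Int × Int × Int) :=
  ((List.range m).filter (freshB c)).map (entry5 c)

lemma mapAbs_succ (c : Int) (m : Nat) :
    mapAbs c (m + 1) =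
      (if hasKey (mapAbs c m) (Cf c m, Cf c (m + 1), Cf c (m + 2), Cf c (m + 3)) then mapAbs c m
       else mapAbs c m ++ [(Cf c m, Cf c (m + 1), Cf c (m + 2), Cf c (m + 3), Pf c (m + 4))]) := by
  simp [mapAbs, List.range_succ]

lemma map_range_drop (f : Nat → Int) (n k : Nat) (h : k ≤ n) :
    ((List.range n).map f).drop k = (List.range (n - k)).map (fun i => f (k + i)) := by
  have hn : n = k + (n - k) := by omega
  conv_lhs => rw [hn]
  rw [List.range_add, List.map_append,
    List.drop_append_of_le_length (by simp),
    List.drop_eq_nil_of_le (by simp), List.nil_append, List.map_map]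
  simp [Function.comp_def]

lemma A_inv (c : Int) (n : Nat) :
    (PySem.List.pyRange 0 (n : Int) 1).foldl stepA ([PySem.Int.mod c 10], [], [], c)
      = ((List.range (n + 1)).map (Pf c), (List.range n).map (Cf c), mapAbs c (n - 3), iterN c n) := by
  induction n with
  | zero =>
    simp only [Nat.cast_zero]
    rw [PySem.List.pyRange_one_eq_nil le_rfl]
    simp [Pf, iterN, mapAbs]
  | succ n ih =>
    rw [show ((n + 1 : Nat) : Int) = (n : Int) + 1 from by push_cast; ring,
      PySem.List.pyRange_one_succ_right (by omega), List.foldl_append, ih]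
    simp only [List.foldl_cons, List.foldl_nil]
    unfold stepA
    by_cases hn : 3 ≤ n
    · obtain ⟨m, rfl⟩ : ∃ m, n = m + 3 := ⟨n - 3, by omega⟩
      have hgt : ((m + 3 : Nat) : Int) > 2 := by push_cast; omega
      simp only [if_pos hgt]
      have hlast : PySem.List.pyGetD ((List.range (m + 3 + 1)).map (Pf c)) (-1) 0 = Pf c (m + 3) := by
        rw [List.range_succ, List.map_append, List.map_singleton,
          PySem.List.pyGetD_neg_one_append_singleton]
      have hch : (List.range (m + 3)).map (Cf c) ++
          [getChange (Pf c (m + 3)) (PySem.Int.mod (getNextNumber (iterN c (m + 3))) 10)]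
          = (List.range (m + 4)).map (Cf c) := by
        rw [List.range_succ, List.map_append, List.map_singleton]
        simp [getChange, Cf, Pf, iterN, List.range_succ, List.append_assoc]
      rw [hlast, hch]
      have hsl : PySem.List.slice ((List.range (m + 4)).map (Cf c)) (some (-4)) none
          = [Cf c m, Cf c (m + 1), Cf c (m + 2), Cf c (m + 3)] := by
        rw [PySem.List.slice_from_neg_ofNat _ 4 (by omega)]
        simp only [List.length_map, List.length_range]
        rw [show (m + 4 - 4 : Nat) = m from by omega,
          map_range_drop (Cf c) (m + 4) m (by omega),
          show (m + 4 - m : Nat) = 4 from by omega]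
        simp [List.range_succ]
      rw [hsl]
      have hmap : mapAbs c (m + 3 + 1 - 3) = mapAbs c (m + 1) := by congr 1
      rw [hmap, mapAbs_succ]
      simp only [Pf, iterN]
      refine Prod.ext ?_ (Prod.ext ?_ (Prod.ext ?_ ?_)) <;>
        simp [Pf, iterN, List.range_succ, List.append_assoc]
    · have hngt : ¬ ((n : Nat) : Int) > 2 := by omega
      simp only [if_neg hngt]
      have hlast : PySem.List.pyGetD ((List.range (n + 1)).map (Pf c)) (-1) 0 = Pf c n := by
        rw [List.range_succ, List.map_append, List.map_singleton,
          PySem.List.pyGetD_neg_one_append_singleton]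
      rw [hlast]
      have hmap : (n + 1 - 3 : Nat) = (n - 3 : Nat) := by omega
      rw [hmap]
      refine Prod.ext ?_ (Prod.ext ?_ (Prod.ext ?_ ?_)) <;>
        simp [List.range_succ, getChange, Cf, Pf, iterN]

-- hasKey over the abstract filtered map = "some earlier window has this key"
lemma Ff_succ (c : Int) (m : Nat) :
    Ff c (m + 1) = Ff c m ++ (if freshB c m = true then [entry5 c m] else []) := by
  unfold Ff
  rw [List.range_succ, List.filter_append, List.map_append, List.filter_singleton]
  by_cases hf : freshB c m = true
  · simp [hf]
  · simp [hf]

lemma hasKey_append (xs ys : List (Int × Int × Int × Int × Int)) (k : Int × Int × Int × Int) :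
    hasKey (xs ++ ys) k = (hasKey xs k || hasKey ys k) := by
  simp [hasKey, List.any_append]

lemma hasKey_Ff (c : Int) (m : Nat) (k : Int × Int × Int × Int) :
    hasKey (Ff c m) k = (List.range m).any (fun j => Kf c j == k) := by
  induction m with
  | zero => simp [Ff, hasKey]
  | succ m ih =>
    rw [Ff_succ, hasKey_append, ih, List.range_succ, List.any_append]
    simp only [List.any_cons, List.any_nil, Bool.or_false]
    by_cases hf : freshB c m = true
    · rw [if_pos hf]
      simp [hasKey, entry5, Kf]
    · have hff : freshB c m = false := by simpa using hf
      rw [hff]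
      simp only [Bool.false_eq_true, if_false]
      have hX : hasKey ([] : List (Int × Int × Int × Int × Int)) k = false := by simp [hasKey]
      rw [hX, Bool.or_false]
      by_cases hk : (Kf c m == k) = true
      · have hkeq : Kf c m = k := by simpa using hk
        have hex : ∃ i, i < m ∧ Kf c i = Kf c m := by
          have hfr := hff
          simp only [freshB, Bool.not_eq_false', List.any_eq_true] at hfr
          obtain ⟨i, hi, hik⟩ := hfr
          exact ⟨i, List.mem_range.mp hi, by simpa using hik⟩
        obtain ⟨i, him, hieq⟩ := hex
        have hA : (List.range m).any (fun j => Kf c j == k) = true :=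
          List.any_eq_true.mpr ⟨i, List.mem_range.mpr him, by simp [hieq, hkeq]⟩
        rw [hA, hk]
        simp
      · have hkf : (Kf c m == k) = false := by simpa using hk
        rw [hkf]
        simp

lemma mapAbs_eq_Ff (c : Int) (m : Nat) : mapAbs c m = Ff c m := by
  induction m with
  | zero => simp [mapAbs, Ff]
  | succ m ih =>
    rw [mapAbs_succ, ih]
    have hk : hasKey (Ff c m) (Cf c m, Cf c (m + 1), Cf c (m + 2), Cf c (m + 3)) = !freshB c m := by
      rw [hasKey_Ff, freshB, Bool.not_not]
      rfl
    rw [hk, Ff, Ff, List.range_succ, List.filter_append, List.filter_singleton, List.map_append]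
    by_cases hf : freshB c m = true
    · simp [hf, entry5]
    · simp only [Bool.not_eq_true] at hf
      simp [hf]

-- B phase 1: the secrets list
lemma B_secrets (c : Int) (n : Nat) :
    (PySem.List.pyRange 0 (n : Int) 1).foldl
        (fun s _ => s ++ [getNextNumber (PySem.List.pyGetD s (-1) 0)]) [c]
      = (List.range (n + 1)).map (iterN c) := by
  induction n with
  | zero =>
    simp only [Nat.cast_zero]
    rw [PySem.List.pyRange_one_eq_nil le_rfl]
    simp [iterN]
  | succ n ih =>
    rw [show ((n + 1 : Nat) : Int) = (n : Int) + 1 from by push_cast; ring,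
      PySem.List.pyRange_one_succ_right (by omega), List.foldl_append, ih]
    simp only [List.foldl_cons, List.foldl_nil]
    rw [List.range_succ (n := n + 1), List.map_append]
    congr 1
    rw [show List.range (n + 1) = List.range n ++ [n] from List.range_succ, List.map_append,
      List.map_singleton, PySem.List.pyGetD_neg_one_append_singleton]
    simp [iterN]

-- B phase 2: the changes list
lemma B_changes (c : Int) (n : Nat) :
    (PySem.List.pyRange 0 (((((List.range (n + 1)).map (Pf c)).length : Int)) - 1) 1).map
        (fun k => PySem.List.pyGetD ((List.range (n + 1)).map (Pf c)) (k + 1) 0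
          - PySem.List.pyGetD ((List.range (n + 1)).map (Pf c)) k 0)
      = (List.range n).map (Cf c) := by
  have hlen : ((((List.range (n + 1)).map (Pf c)).length : Int)) - 1 = (n : Int) := by
    simp
  rw [hlen, PySem.List.pyRange_one, List.map_map]
  simp only [Int.sub_zero, Int.toNat_natCast]
  refine List.map_congr_left ?_
  intro i hi
  have hi' : i < n := List.mem_range.mp hi
  simp only [Function.comp_def, Int.zero_add]
  rw [show ((i : Int) + 1) = ((i + 1 : Nat) : Int) from by push_cast; ring,
    PySem.List.pyGetD_natCast, PySem.List.pyGetD_natCast,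
    List.getD_eq_getElem _ _ (by simp; omega), List.getD_eq_getElem _ _ (by simp; omega)]
  simp [Cf]

-- the window key read off the concrete changes list
lemma key4_eq (c : Int) (n j : Nat) (hj : j + 4 ≤ n) :
    key4 ((List.range n).map (Cf c)) ((j : Nat) : Int) = Kf c j := by
  unfold key4
  have hsl : PySem.List.slice ((List.range n).map (Cf c)) (some ((j : Nat) : Int))
      (some (((j : Nat) : Int) + 4)) = [Cf c j, Cf c (j + 1), Cf c (j + 2), Cf c (j + 3)] := by
    rw [show (((j : Nat) : Int) + 4) = ((j : Nat) : Int) + ((4 : Nat) : Int) from by norm_num,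
      PySem.List.slice_natCast_add,
      map_range_drop (Cf c) n j (by omega), ← List.map_take, List.take_range,
      show min 4 (n - j) = 4 from by omega]
    simp [List.range_succ]
  rw [hsl]
  rfl

-- the reverse-overwrite fold, read through foldr: lookup = FIRST matching index in the list
lemma get?_revDict (ch : List Int) (js : List Int) (k : Int × Int × Int × Int) :
    (js.foldr (fun j d => PySem.Dict.insert d (key4 ch j) j)
        (PySem.Dict.empty : PySem.Dict (Int × Int × Int × Int) Int)).get? k
      = js.find? (fun j => key4 ch j == k) := by
  induction js with
  | nil => simp [PySem.Dict.get?_empty]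
  | cons a t ih =>
    simp only [List.foldr_cons, List.find?_cons]
    rw [PySem.Dict.get?_insert]
    by_cases hk : key4 ch a = k
    · simp [hk]
    · have : (key4 ch a == k) = false := by simpa using hk
      rw [this, if_neg (by exact fun h => hk h.symm)]
      exact ih

-- find? over an initial range hits j exactly when nothing earlier matches
lemma find?_range_eq_some_iff (p : Nat → Bool) (m j : Nat) (hj : j < m) (hpj : p j = true) :
    (List.range m).find? p = some j ↔ ∀ i < j, p i = false := by
  have hdecomp : List.range m = List.range j ++ (List.range (m - j)).map (fun i => j + i) := by
    rw [← List.range_add]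
    congr 1
    omega
  constructor
  · intro h i hij
    by_contra hpi
    have hpi' : p i = true := by
      cases hpib : p i
      · exact absurd hpib hpi
      · rfl
    have hsome : ((List.range j).find? p).isSome := by
      rw [List.find?_isSome]
      exact ⟨i, List.mem_range.mpr hij, hpi'⟩
    obtain ⟨i0, hi0⟩ := Option.isSome_iff_exists.mp hsome
    have heq : (List.range m).find? p = some i0 := by
      rw [hdecomp, List.find?_append, hi0, Option.some_or]
    rw [h] at heq
    have hji : i0 < j := List.mem_range.mp (List.mem_of_find?_eq_some hi0)
    have : j = i0 := by injection heq
    omega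
  · intro hall
    have hnone : (List.range j).find? p = none := by
      rw [List.find?_eq_none]
      intro x hx
      rw [hall x (List.mem_range.mp hx)]
      simp
    have hmjpos : m - j = (m - j - 1) + 1 := by omega
    rw [hdecomp, List.find?_append, hnone, Option.none_or, hmjpos,
      List.range_succ_eq_map, List.map_cons, List.find?_cons]
    simp [hpj]

-- the condition of B's second pass is exactly freshness
lemma cond_eq (c : Int) (n j : Nat) (hj : j + 4 ≤ n)
    (first : PySem.Dict (Int × Int × Int × Int) Int)
    (hfirst : first = ((PySem.List.pyRange 0 ((n : Int) - 3) 1).reverse).foldl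
      (fun d i => PySem.Dict.insert d (key4 ((List.range n).map (Cf c)) i) i)
      (PySem.Dict.empty : PySem.Dict (Int × Int × Int × Int) Int)) :
    ((PySem.Dict.get? first (key4 ((List.range n).map (Cf c)) ((j : Nat) : Int))).getD 0
        == ((j : Nat) : Int)) = freshB c j := by
  have hm3 : ((n : Int) - 3) = (((n - 3 : Nat)) : Int) := by push_cast; omega
  set m := n - 3 with hmdef
  have hjm : j < m := by omega
  rw [hfirst, List.foldl_reverse]
  have hjs : PySem.List.pyRange 0 ((n : Int) - 3) 1 = (List.range m).map (fun (i : Nat) => (i : Int)) := by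
    rw [hm3, PySem.List.pyRange_one]
    rw [show ((((m : Nat) : Int)) - 0).toNat = m from by omega]
    exact List.map_congr_left (fun i _ => by omega)
  rw [hjs, get?_revDict, key4_eq c n j hj, List.find?_map]
  set p : Nat → Bool :=
    (fun i => key4 ((List.range n).map (Cf c)) i == Kf c j) ∘ (fun (i : Nat) => (i : Int))
    with hp
  have hpj : p j = true := by
    simp only [hp, Function.comp_def, key4_eq c n j hj]
    simp
  have hpi : ∀ i < m, p i = (Kf c i == Kf c j) := by
    intro i him
    simp only [hp, Function.comp_def, key4_eq c n i (by omega)]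
  by_cases hf : freshB c j = true
  · have hall : ∀ i < j, p i = false := by
      intro i hij
      rw [hpi i (by omega)]
      have hfr := hf
      simp only [freshB, Bool.not_eq_true', List.any_eq_false] at hfr
      simpa using hfr i (List.mem_range.mpr hij)
    have hfind : (List.range m).find? p = some j :=
      (find?_range_eq_some_iff p m j hjm hpj).mpr hall
    rw [hf, hfind]
    simp
  · have hff : freshB c j = false := by simpa using hf
    have hex : ∃ i, i < j ∧ p i = true := by
      have hfr := hff
      simp only [freshB, Bool.not_eq_false', List.any_eq_true] at hfr
      obtain ⟨i, hi, hk⟩ := hfr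
      have hij : i < j := List.mem_range.mp hi
      exact ⟨i, hij, by rw [hpi i (by omega)]; simpa using hk⟩
    obtain ⟨i, hij, hpit⟩ := hex
    have hsome : ((List.range m).find? p).isSome := by
      rw [List.find?_isSome]
      exact ⟨i, List.mem_range.mpr (by omega), hpit⟩
    obtain ⟨i0, hi0⟩ := Option.isSome_iff_exists.mp hsome
    have hne : i0 ≠ j := by
      intro h
      subst h
      have hall := (find?_range_eq_some_iff p m i0 hjm hpj).mp hi0
      rw [hall i hij] at hpit
      exact absurd hpit (by simp)
    rw [hff, hi0]
    simp only [Option.map_some, Option.getD_some]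
    exact beq_eq_false_iff_ne.mpr (fun h => hne (by exact_mod_cast h))

-- B's second pass builds the abstract filtered map
lemma B_fold (c : Int) (n : Nat)
    (first : PySem.Dict (Int × Int × Int × Int) Int)
    (hfirst : first = ((PySem.List.pyRange 0 ((n : Int) - 3) 1).reverse).foldl
      (fun d i => PySem.Dict.insert d (key4 ((List.range n).map (Cf c)) i) i)
      (PySem.Dict.empty : PySem.Dict (Int × Int × Int × Int) Int))
    (t : Nat) (ht : t + 3 ≤ n) :
    (PySem.List.pyRange 0 (t : Int) 1).foldl
      (fun res j =>
        if (PySem.Dict.get? first (key4 ((List.range n).map (Cf c)) j)).getD 0 == j then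
          dcInsert res (key4 ((List.range n).map (Cf c)) j)
            (PySem.List.pyGetD ((List.range (n + 1)).map (Pf c)) (j + 4) 0)
        else res) []
      = Ff c t := by
  induction t with
  | zero =>
    simp only [Nat.cast_zero]
    rw [PySem.List.pyRange_one_eq_nil le_rfl]
    simp [Ff]
  | succ t ih =>
    rw [show ((t + 1 : Nat) : Int) = (t : Int) + 1 from by push_cast; ring,
      PySem.List.pyRange_one_succ_right (by omega), List.foldl_append, ih (by omega)]
    simp only [List.foldl_cons, List.foldl_nil]
    rw [cond_eq c n t (by omega) first hfirst, key4_eq c n t (by omega)]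
    have hget : PySem.List.pyGetD ((List.range (n + 1)).map (Pf c)) (((t : Nat) : Int) + 4) 0
        = Pf c (t + 4) := by
      rw [show (((t : Nat) : Int) + 4) = (((t + 4 : Nat)) : Int) from by push_cast; ring,
        PySem.List.pyGetD_natCast, List.getD_eq_getElem _ _ (by simp; omega)]
      simp
    rw [hget]
    by_cases hf : freshB c t = true
    · rw [hf, if_pos rfl]
      have hnk : hasKey (Ff c t) (Kf c t) = false := by
        rw [hasKey_Ff]
        have := hf
        simp only [freshB, Bool.not_eq_true'] at this
        exact this
      rw [dcInsert, hnk]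
      simp only [Bool.false_eq_true, if_false]
      rw [Ff, Ff, List.range_succ, List.filter_append, List.filter_singleton, List.map_append]
      simp [hf, entry5, Kf]
    · simp only [Bool.not_eq_true] at hf
      rw [hf]
      simp only [Bool.false_eq_true, if_false]
      rw [Ff, Ff, List.range_succ, List.filter_append, List.filter_singleton]
      simp [hf]

lemma pyRange_toNat (it : Int) :
    PySem.List.pyRange 0 it 1 = PySem.List.pyRange 0 (it.toNat : Int) 1 := by
  by_cases h : 0 ≤ it
  · rw [Int.toNat_of_nonneg h]
  · rw [PySem.List.pyRange_one_eq_nil (by omega), PySem.List.pyRange_one_eq_nil (by omega)]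

lemma main_eq (c it : Int) : getPriceMap c it = getPriceMap_alt c it := by
  unfold getPriceMap getPriceMap_alt
  rw [pyRange_toNat it]
  set N := it.toNat with hN
  rw [A_inv c N, B_secrets c N]
  simp only []
  have hprices : ((List.range (N + 1)).map (iterN c)).map (fun s => PySem.Int.mod s 10)
      = (List.range (N + 1)).map (Pf c) := by
    rw [List.map_map]; rfl
  rw [hprices, B_changes c N]
  have hlen : (((List.range N).map (Cf c)).length : Int) = (N : Int) := by simp
  rw [hlen]
  by_cases h3 : 3 ≤ N
  · rw [mapAbs_eq_Ff]
    have hcast : ((N : Int) - 3) = (((N - 3 : Nat)) : Int) := by push_cast; omega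
    rw [hcast]
    exact (B_fold c N _ (by rw [hcast]) (N - 3) (by omega)).symm
  · rw [show (N - 3 : Nat) = 0 from by omega, mapAbs_eq_Ff]
    rw [PySem.List.pyRange_one_eq_nil (by omega)]
    simp [Ff]

-- ===== VERDICT (by name: the statement is the Claim_ definition above) =====
theorem getPriceMap_spec : Claim_equal_getPriceMap := by
  intro c it _
  unfold Spec_getPriceMap
  exact main_eq c it
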